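/- GENERATED by farm/mkstatement.py from design/units.split.tsv — do not edit.
   THE SPLIT of the proof unit `vorbis_decode_initial` into `vorbis_decode_initial.1`, `vorbis_decode_initial.2`, `vorbis_decode_initial.3`, `vorbis_decode_initial.4`, `vorbis_decode_initial.5`, `vorbis_decode_initial.6`, `vorbis_decode_initial.7`, `vorbis_decode_initial.8`, `vorbis_decode_initial.9`, `vorbis_decode_initial.COMPOSITION`: the children's statements give the parent's
   UNCHANGED statement (so nothing above the parent — callers, compositions — is touched by the split). -/
import Vorbis.Spec.Units.vorbis_decode_initial
import Vorbis.Spec.Units.vorbis_decode_initial_1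
import Vorbis.Spec.Units.vorbis_decode_initial_2
import Vorbis.Spec.Units.vorbis_decode_initial_3
import Vorbis.Spec.Units.vorbis_decode_initial_4
import Vorbis.Spec.Units.vorbis_decode_initial_5
import Vorbis.Spec.Units.vorbis_decode_initial_6
import Vorbis.Spec.Units.vorbis_decode_initial_7
import Vorbis.Spec.Units.vorbis_decode_initial_8
import Vorbis.Spec.Units.vorbis_decode_initial_9
import Vorbis.Spec.Units.vorbis_decode_initial_COMPOSITION
namespace Vorbis.Spec.Splits
open X86 X86.User Asan

/-- The segments of the split function `vorbis_decode_initial` and their composition prove its contract. -/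
theorem vorbis_decode_initial
    (h_vorbis_decode_initial_1 : Vorbis.Spec.vorbis_decode_initial_1.Statement)
    (h_vorbis_decode_initial_2 : Vorbis.Spec.vorbis_decode_initial_2.Statement)
    (h_vorbis_decode_initial_3 : Vorbis.Spec.vorbis_decode_initial_3.Statement)
    (h_vorbis_decode_initial_4 : Vorbis.Spec.vorbis_decode_initial_4.Statement)
    (h_vorbis_decode_initial_5 : Vorbis.Spec.vorbis_decode_initial_5.Statement)
    (h_vorbis_decode_initial_6 : Vorbis.Spec.vorbis_decode_initial_6.Statement)
    (h_vorbis_decode_initial_7 : Vorbis.Spec.vorbis_decode_initial_7.Statement)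
    (h_vorbis_decode_initial_8 : Vorbis.Spec.vorbis_decode_initial_8.Statement)
    (h_vorbis_decode_initial_9 : Vorbis.Spec.vorbis_decode_initial_9.Statement)
    (h_vorbis_decode_initial_COMPOSITION : Vorbis.Spec.vorbis_decode_initial_COMPOSITION.Statement) :
    Vorbis.Spec.vorbis_decode_initial.Statement := by
  intro Lay _hLay μ _hμ u₀ _hcode _h_asan_store4_noabort _h_asan_load4_noabort _h_maybe_start_packet _h_get_bits _h_get8_packet _h_ilog _h_asan_load1_noabort
  exact h_vorbis_decode_initial_COMPOSITION Lay _hLay μ _hμ u₀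
    (h_vorbis_decode_initial_1 Lay _hLay μ _hμ u₀ _hcode _h_asan_store4_noabort)
    (h_vorbis_decode_initial_2 Lay _hLay μ _hμ u₀ _hcode _h_asan_load4_noabort _h_maybe_start_packet _h_get_bits)
    (h_vorbis_decode_initial_3 Lay _hLay μ _hμ u₀ _hcode _h_get8_packet)
    (h_vorbis_decode_initial_4 Lay _hLay μ _hμ u₀ _hcode _h_asan_load4_noabort _h_get_bits _h_ilog)
    (h_vorbis_decode_initial_5 Lay _hLay μ _hμ u₀ _hcode _h_asan_store4_noabort _h_asan_load4_noabort _h_asan_load1_noabort)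
    (h_vorbis_decode_initial_6 Lay _hLay μ _hμ u₀ _hcode _h_asan_load4_noabort _h_get_bits)
    (h_vorbis_decode_initial_7 Lay _hLay μ _hμ u₀ _hcode _h_asan_store4_noabort _h_asan_load4_noabort _h_asan_load1_noabort)
    (h_vorbis_decode_initial_8 Lay _hLay μ _hμ u₀ _hcode _h_asan_store4_noabort _h_asan_load4_noabort)
    (h_vorbis_decode_initial_9 Lay _hLay μ _hμ u₀ _hcode)

end Vorbis.Spec.Splits
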